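-- pv_equiv track=rewrite | github.com/ruben-vl/aoc | 2015/python/day6.py | toggle
-- ===== SOURCE A (Python) =====
-- def toggle(grid: set[tuple[int, int]], x1, y1, x2, y2):
--     for x in range(x1, x2+1):
--         for y in range(y1, y2+1):
--             if (x,y) in grid:
--                 grid.remove((x,y))
--             else:
--                 grid.add((x,y))
--     return grid
-- ===== SOURCE B (Python) =====
-- def toggle(grid: set[tuple[int, int]], x1, y1, x2, y2):
--     present = {p for p in grid if x1 <= p[0] <= x2 and y1 <= p[1] <= y2}
--     grid.difference_update(present)
--     grid.update((x, y) for x in range(x1, x2 + 1) for y in range(y1, y2 + 1)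
--                 if (x, y) not in present)
--     return grid
-- ===== Notes on version B (the rewrite author's own statement) =====
-- stated objective: alternative
-- what changed: Instead of enumerating every rectangle cell and toggling it with a membership test and add/remove branch, B scans the existing grid once with an arithmetic bounds test to collect the cells to delete, bulk-removes them with difference_update, and then bulk-adds in one update exactly the rectangle cells that were not already lit; the rectangle cells already present are never enumerated against the set at all.
import Mathlib
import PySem

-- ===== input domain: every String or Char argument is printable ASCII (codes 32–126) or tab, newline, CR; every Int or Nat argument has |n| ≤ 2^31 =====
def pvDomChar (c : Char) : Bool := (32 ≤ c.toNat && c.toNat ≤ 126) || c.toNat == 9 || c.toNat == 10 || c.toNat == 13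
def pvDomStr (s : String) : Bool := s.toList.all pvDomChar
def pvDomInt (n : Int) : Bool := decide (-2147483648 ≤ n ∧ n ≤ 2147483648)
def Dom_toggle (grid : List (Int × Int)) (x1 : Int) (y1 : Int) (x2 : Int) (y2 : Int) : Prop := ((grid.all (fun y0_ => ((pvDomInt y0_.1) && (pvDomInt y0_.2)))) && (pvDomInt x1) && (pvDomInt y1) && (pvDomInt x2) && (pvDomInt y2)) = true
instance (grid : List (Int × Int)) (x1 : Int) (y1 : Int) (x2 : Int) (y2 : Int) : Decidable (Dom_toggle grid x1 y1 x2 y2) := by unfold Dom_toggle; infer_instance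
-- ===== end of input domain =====

-- B replaces A's per-cell membership-toggle loop by one scan of the grid with an arithmetic
-- bounds test (bulk delete), followed by one bulk insert of the rectangle cells that were not
-- lit (objective: alternative). Both A and B mutate `grid` in place in Python and return that
-- same object; the equivalence proved here is about the returned value.

-- ===== PORT A =====
-- one iteration of A's inner loop body: toggle membership of one cell
def toggleStep (g : PySem.Set (Int × Int)) (p : Int × Int) : PySem.Set (Int × Int) :=
  if PySem.Set.contains g p then (PySem.Set.remove? g p).getD g else PySem.Set.add g p

def toggle (grid : List (Int × Int)) (x1 : Int) (y1 : Int) (x2 : Int) (y2 : Int) : List (Int × Int) :=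
  (PySem.List.pyRange x1 (x2 + 1) 1).foldl
    (fun g x => (PySem.List.pyRange y1 (y2 + 1) 1).foldl (fun g y => toggleStep g (x, y)) g)
    grid

-- ===== PORT B =====
-- `x1 <= p[0] <= x2 and y1 <= p[1] <= y2`
def inRect (x1 y1 x2 y2 : Int) (p : Int × Int) : Bool :=
  decide (x1 ≤ p.1) && decide (p.1 ≤ x2) && decide (y1 ≤ p.2) && decide (p.2 ≤ y2)

def toggle_alt (grid : List (Int × Int)) (x1 : Int) (y1 : Int) (x2 : Int) (y2 : Int) : List (Int × Int) :=
  let present := grid.filter (inRect x1 y1 x2 y2)        -- the set comprehension over grid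
  let g1 := PySem.Set.diff grid present                  -- grid.difference_update(present)
  PySem.Set.update g1                                     -- grid.update(generator)
    ((PySem.List.pyRange x1 (x2 + 1) 1).flatMap
      (fun x => ((PySem.List.pyRange y1 (y2 + 1) 1).map (fun y => (x, y))).filter
        (fun c => !PySem.Set.contains present c)))

-- ===== PRECONDITION & SPEC =====
-- Pre_ only requires that `grid` really encodes a Python set (distinct elements); a list with
-- duplicates corresponds to no input the Python function can receive, so nothing A returns on
-- is excluded.
def Pre_toggle (grid : List (Int × Int)) (x1 : Int) (y1 : Int) (x2 : Int) (y2 : Int) : Prop := grid.Nodup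
instance (grid : List (Int × Int)) (x1 : Int) (y1 : Int) (x2 : Int) (y2 : Int) : Decidable (Pre_toggle grid x1 y1 x2 y2) := by unfold Pre_toggle; infer_instance
def pvWitness_toggle : (List (Int × Int)) × Int × Int × Int × Int := ([(0, 0), (2, 1)], 0, 0, 1, 1)

def Spec_toggle (grid : List (Int × Int)) (x1 : Int) (y1 : Int) (x2 : Int) (y2 : Int) (out : List (Int × Int)) : Prop := out = toggle_alt grid x1 y1 x2 y2
instance (grid : List (Int × Int)) (x1 : Int) (y1 : Int) (x2 : Int) (y2 : Int) (out : List (Int × Int)) : Decidable (Spec_toggle grid x1 y1 x2 y2 out) := by unfold Spec_toggle; infer_instance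

-- ===== CLAIM (what is proved, stated in full; the proofs are below) =====
def Claim_equal_toggle : Prop := ∀ (grid : List (Int × Int)) (x1 : Int) (y1 : Int) (x2 : Int) (y2 : Int), Dom_toggle grid x1 y1 x2 y2 → Pre_toggle grid x1 y1 x2 y2 → Spec_toggle grid x1 y1 x2 y2 (toggle grid x1 y1 x2 y2)

-- ===== LEMMAS AND PROOFS =====

-- folding over a flatMap is the nested fold
theorem pv_foldl_flatMap {α β γ : Type} (f : α → List β) (g : γ → β → γ) (xs : List α) (i : γ) :
    (xs.flatMap f).foldl g i = xs.foldl (fun a x => (f x).foldl g a) i := by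
  induction xs generalizing i with
  | nil => rfl
  | cons a xs ih => simp [List.flatMap_cons, List.foldl_append, ih]

-- the full rectangle, row-major
def pvRect (x1 y1 x2 y2 : Int) : List (Int × Int) :=
  (PySem.List.pyRange x1 (x2 + 1) 1).flatMap
    (fun x => (PySem.List.pyRange y1 (y2 + 1) 1).map (fun y => (x, y)))

theorem pv_mem_rect (x1 y1 x2 y2 : Int) (p : Int × Int) :
    p ∈ pvRect x1 y1 x2 y2 ↔ inRect x1 y1 x2 y2 p = true := by
  cases p with
  | mk a b =>
    simp only [pvRect, List.mem_flatMap, List.mem_map, PySem.List.mem_pyRange_one, inRect,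
      Prod.mk.injEq, Bool.and_eq_true, decide_eq_true_eq]
    constructor
    · rintro ⟨x, hx, y, hy, rfl, rfl⟩
      omega
    · intro h
      exact ⟨a, by omega, b, by omega, rfl, rfl⟩

theorem pv_rect_nodup (x1 y1 x2 y2 : Int) : (pvRect x1 y1 x2 y2).Nodup := by
  unfold pvRect
  rw [List.nodup_flatMap]
  refine ⟨fun x _ => ?_, ?_⟩
  · exact (PySem.List.nodup_pyRange_one _ _).map (fun a b h => by simpa using h)
  · refine (PySem.List.nodup_pyRange_one _ _).imp ?_
    intro a b hab
    simp only [Function.onFun, List.disjoint_left, List.mem_map]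
    rintro p ⟨y, hy, rfl⟩ ⟨y', hy', h⟩
    injection h with h1 h2
    exact hab h1.symm

-- A's fold over a duplicate-free cell list: keep the untouched cells, append the new ones
theorem pv_foldl_toggle (L : List (Int × Int)) :
    ∀ g : List (Int × Int), L.Nodup → g.Nodup →
    L.foldl toggleStep g
      = g.filter (fun p => !decide (p ∈ L)) ++ L.filter (fun c => !decide (c ∈ g)) := by
  induction L with
  | nil => intro g _ _; simp
  | cons c L ih =>
    intro g hL hg
    have hLn : L.Nodup := hL.of_cons
    have hcL : c ∉ L := (List.nodup_cons.mp hL).1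
    by_cases hm : c ∈ g
    · have hstep : toggleStep g c = g.filter (fun p => !(p == c)) := by
        unfold toggleStep
        rw [if_pos ((PySem.Set.contains_iff _ _).mpr hm), PySem.Set.remove?_of_mem hm,
          Option.getD_some]
        rfl
      have hg' : (g.filter (fun p => !(p == c))).Nodup := hg.filter _
      rw [List.foldl_cons, hstep, ih _ hLn hg']
      congr 1
      · rw [List.filter_filter]
        apply List.filter_congr
        intro p _
        by_cases hpc : p = c <;> simp [hpc]
      · rw [List.filter_cons]
        have hfc : (!decide (c ∈ g)) = false := by simp [hm]
        rw [hfc]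
        simp only [Bool.false_eq_true, if_false]
        apply List.filter_congr
        intro x hx
        have hxc : x ≠ c := fun h => hcL (h ▸ hx)
        simp [List.mem_filter, hxc]
    · have hstep : toggleStep g c = g ++ [c] := by
        unfold toggleStep
        rw [if_neg ?_, PySem.Set.add, if_neg ?_] <;>
          simp [PySem.Set.contains, List.contains_iff_mem, hm]
      have hgn : (g ++ [c]).Nodup := by
        simp only [List.nodup_append, List.nodup_singleton]
        exact ⟨hg, trivial, fun a ha b hb => fun h => hm ((h.trans (List.mem_singleton.mp hb)) ▸ ha)⟩
      rw [List.foldl_cons, hstep, ih _ hLn hgn]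
      have h3 : List.filter (fun p => !decide (p ∈ (c :: L))) g
          = List.filter (fun p => !decide (p ∈ L)) g := by
        apply List.filter_congr
        intro p hp
        have : p ≠ c := fun h => hm (h ▸ hp)
        simp [this]
      have h4 : List.filter (fun x => !decide (x ∈ g ++ [c])) L
          = List.filter (fun x => !decide (x ∈ g)) L := by
        apply List.filter_congr
        intro x hx
        have hxc : x ≠ c := fun h => hcL (h ▸ hx)
        simp [hxc]
      have h2 : List.filter (fun p => !decide (p ∈ L)) [c] = [c] := by
        simp [List.filter_singleton, hcL]
      have h5 : List.filter (fun x => !decide (x ∈ g)) (c :: L)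
          = c :: List.filter (fun x => !decide (x ∈ g)) L := by
        rw [List.filter_cons]
        simp [hm]
      rw [List.filter_append, h2, h3, h4, h5]
      simp

-- update (= foldl add) by fresh, duplicate-free elements is a plain append
theorem pv_update_fresh (S : List (Int × Int)) :
    ∀ g : List (Int × Int), S.Nodup → (∀ c ∈ S, c ∉ g) →
    PySem.Set.update g S = g ++ S := by
  induction S with
  | nil => intro g _ _; simp [PySem.Set.update]
  | cons c S ih =>
    intro g hS hfresh
    have hcg : c ∉ g := hfresh c (by simp)
    have hadd : PySem.Set.add g c = g ++ [c] := by
      rw [PySem.Set.add, if_neg]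
      simp [PySem.Set.contains, List.contains_iff_mem, hcg]
    have hstep : PySem.Set.update g (c :: S) = PySem.Set.update (g ++ [c]) S := by
      simp [PySem.Set.update, hadd]
    rw [hstep, ih (g ++ [c]) hS.of_cons ?_]
    · simp
    · intro d hd
      have hdc : d ≠ c := fun h => (List.nodup_cons.mp hS).1 (h ▸ hd)
      simp [hdc]
      exact hfresh d (by simp [hd])

-- ===== VERDICT (by name: the statement is the Claim_ definition above) =====
theorem toggle_spec : Claim_equal_toggle := by
  intro grid x1 y1 x2 y2 _ hpre
  unfold Spec_toggle
  have hA : toggle grid x1 y1 x2 y2 = (pvRect x1 y1 x2 y2).foldl toggleStep grid := by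
    simp [toggle, pvRect, pv_foldl_flatMap, List.foldl_map]
  rw [hA, pv_foldl_toggle _ _ (pv_rect_nodup x1 y1 x2 y2) hpre]
  simp only [toggle_alt]
  have hdiff : PySem.Set.diff grid (grid.filter (inRect x1 y1 x2 y2))
      = grid.filter (fun p => !decide (p ∈ pvRect x1 y1 x2 y2)) := by
    rw [PySem.Set.diff]
    apply List.filter_congr
    intro p hp
    simp [PySem.Set.contains, List.contains_iff_mem, List.mem_filter, hp, pv_mem_rect]
  have hflt : ((PySem.List.pyRange x1 (x2 + 1) 1).flatMap
        (fun x => ((PySem.List.pyRange y1 (y2 + 1) 1).map (fun y => (x, y))).filter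
          (fun c => !PySem.Set.contains (grid.filter (inRect x1 y1 x2 y2)) c)))
      = (pvRect x1 y1 x2 y2).filter (fun c => !decide (c ∈ grid)) := by
    rw [show (pvRect x1 y1 x2 y2).filter (fun c => !decide (c ∈ grid))
        = (PySem.List.pyRange x1 (x2 + 1) 1).flatMap
            (fun x => ((PySem.List.pyRange y1 (y2 + 1) 1).map (fun y => (x, y))).filter
              (fun c => !decide (c ∈ grid))) from by
      simp [pvRect, List.filter_flatMap]]
    apply List.flatMap_congr
    intro x hx
    apply List.filter_congr
    intro c hc
    have hcr : c ∈ pvRect x1 y1 x2 y2 := by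
      simp only [pvRect, List.mem_flatMap]
      exact ⟨x, hx, hc⟩
    have hir : inRect x1 y1 x2 y2 c = true := (pv_mem_rect _ _ _ _ _).mp hcr
    simp [PySem.Set.contains, List.contains_iff_mem, List.mem_filter, hir]
  rw [hdiff, hflt]
  refine (pv_update_fresh _ _ ((pv_rect_nodup x1 y1 x2 y2).filter _) ?_).symm
  intro c hc
  have hng : c ∉ grid := by simpa using (List.mem_filter.mp hc).2
  simp [List.mem_filter, hng]
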